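-- pv_equiv track=rewrite | github.com/moranmiz/Cooking-Up-Creativity | cooking_up_creativity/src/evaluate_ideas/evaluate_taste.py | get_ingr_collision_count
-- ===== SOURCE A (Python) =====
-- def get_ingr_collision_count(problematic_pairs: list, preferred_order: list = []) -> dict:
--     """
--     Returns a dictionary mapping each ingredient to the number of collisions it is involved in.
--
--     :param problematic_pairs: a list of problematic ingredient pairs (collisions)
--     :param preferred_order: a list of ingredients in a preferred order (to be prioritized less for removal)
--     :return: a dictionary mapping each ingredient to its collision count (sorted by count and essentials)
--     """
--
--     ingr_problematic_pair_count = {}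
--
--     for pair in problematic_pairs:
--         ingr1, ingr2 = pair
--         if ingr1 not in ingr_problematic_pair_count:
--             ingr_problematic_pair_count[ingr1] = 0
--         if ingr2 not in ingr_problematic_pair_count:
--             ingr_problematic_pair_count[ingr2] = 0
--         ingr_problematic_pair_count[ingr1] += 1
--         ingr_problematic_pair_count[ingr2] += 1
--
--     # sort based if the ingredient is in the top items:
--     ingr_problematic_pair_count = {k: v for k, v in sorted(ingr_problematic_pair_count.items(), key=lambda item: item[0] in preferred_order)}
--
--     # sort the ingredients by the number of problematic pairs they are in:
--     ingr_problematic_pair_count = {k: v for k, v in sorted(ingr_problematic_pair_count.items(), key=lambda item: item[1], reverse=True)}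
--
--     return ingr_problematic_pair_count
-- ===== SOURCE B (Python) =====
-- def get_ingr_collision_count(problematic_pairs: list, preferred_order: list = []) -> dict:
--     # Count collisions per ingredient.
--     counts = {}
--     for pair in problematic_pairs:
--         for ingr in pair:
--             counts[ingr] = counts.get(ingr, 0) + 1
--     # Distribute ingredients into count buckets (non-preferred / preferred kept apart):
--     # a counting/bucket sort, no comparison sort at all.
--     buckets_np = {}
--     buckets_p = {}
--     for k, v in counts.items():
--         b = buckets_p if k in preferred_order else buckets_np
--         b.setdefault(v, []).append(k)
--     # Emit buckets from the highest possible count down; within a count,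
--     # non-preferred ingredients first, insertion order within each bucket.
--     result = {}
--     for c in range(2 * len(problematic_pairs), 0, -1):
--         for k in buckets_np.get(c, []):
--             result[k] = c
--         for k in buckets_p.get(c, []):
--             result[k] = c
--     return result
-- ===== Notes on version B (the rewrite author's own statement) =====
-- stated objective: alternative
-- what changed: Replaces A's two chained comparison sorts by a counting/bucket sort: ingredients are distributed into per-count buckets (non-preferred and preferred kept in separate bucket tables) and the result is emitted by scanning the possible counts from highest to lowest, so no comparison sort is performed at all.
import Mathlib
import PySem

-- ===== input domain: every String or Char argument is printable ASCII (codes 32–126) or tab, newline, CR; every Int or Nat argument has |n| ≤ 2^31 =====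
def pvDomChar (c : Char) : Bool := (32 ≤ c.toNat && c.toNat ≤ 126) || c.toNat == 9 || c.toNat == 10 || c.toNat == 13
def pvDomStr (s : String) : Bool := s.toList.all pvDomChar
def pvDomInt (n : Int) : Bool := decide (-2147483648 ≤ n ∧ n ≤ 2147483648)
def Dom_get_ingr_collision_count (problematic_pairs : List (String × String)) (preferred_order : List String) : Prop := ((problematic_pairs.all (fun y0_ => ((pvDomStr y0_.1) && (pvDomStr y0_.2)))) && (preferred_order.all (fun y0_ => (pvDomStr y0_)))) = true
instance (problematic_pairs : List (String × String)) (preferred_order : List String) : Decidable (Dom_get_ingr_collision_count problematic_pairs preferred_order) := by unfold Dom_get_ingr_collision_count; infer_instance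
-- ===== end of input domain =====

-- B replaces A's two chained stable comparison sorts by a counting/bucket sort: ingredients are
-- distributed into per-count buckets (non-preferred and preferred kept in separate bucket tables)
-- and the result is emitted scanning the possible counts from highest to lowest; objective: alternative.


-- ===== PORT A =====
-- literal transliteration of A: the counting loop tests membership and initialises each key to 0,
-- then increments ('d[ingr] += 1' reads a key that is guaranteed present, so getD _ 0 is that read);
-- each of the two dict comprehensions over the two chained stable sorted() calls rebuilds the dict (ofList).
def get_ingr_collision_count (problematic_pairs : List (String × String)) (preferred_order : List String) : List (String × Int) :=
  let d := problematic_pairs.foldl (fun d pair =>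
      let d := if d.contains pair.1 then d else d.insert pair.1 0
      let d := if d.contains pair.2 then d else d.insert pair.2 0
      let d := d.insert pair.1 (d.getD pair.1 0 + 1)
      d.insert pair.2 (d.getD pair.2 0 + 1)) PySem.Dict.empty
  let d1 := PySem.Dict.ofList (PySem.List.sorted d.items (fun item => preferred_order.contains item.1) false)
  let d2 := PySem.Dict.ofList (PySem.List.sorted d1.items (fun item => item.2) true)
  d2.items

-- ===== PORT B =====
-- literal transliteration of B: flat counts.get(ingr, 0) + 1 counting loop; then one loop over
-- counts.items() distributing each ingredient into buckets_np / buckets_p at its count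
-- (b.setdefault(v, []).append(k), i.e. the entry at v becomes its old list, [] if absent, with k
-- appended, keeping the key's insertion position — insert kv.2 (getD kv.2 [] ++ [kv.1]) is exactly
-- that); then the emission loop over range(2*len(problematic_pairs), 0, -1)
-- writing each bucket's non-preferred then preferred ingredients into result.
def get_ingr_collision_count_alt (problematic_pairs : List (String × String)) (preferred_order : List String) : List (String × Int) :=
  let counts := problematic_pairs.foldl (fun d pair =>
      [pair.1, pair.2].foldl (fun d ingr => d.insert ingr (d.getD ingr 0 + 1)) d) PySem.Dict.empty
  let bs := counts.items.foldl
      (fun (bs : PySem.Dict Int (List String) × PySem.Dict Int (List String)) kv =>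
        if preferred_order.contains kv.1
        then (bs.1, bs.2.insert kv.2 (bs.2.getD kv.2 [] ++ [kv.1]))
        else (bs.1.insert kv.2 (bs.1.getD kv.2 [] ++ [kv.1]), bs.2))
      (PySem.Dict.empty, PySem.Dict.empty)
  let result := (PySem.List.pyRange (2 * (problematic_pairs.length : Int)) 0 (-1)).foldl
      (fun r c =>
        let r := (bs.1.getD c []).foldl (fun r k => r.insert k c) r
        (bs.2.getD c []).foldl (fun r k => r.insert k c) r)
      PySem.Dict.empty
  result.items

-- ===== PRECONDITION & SPEC =====
def Spec_get_ingr_collision_count (problematic_pairs : List (String × String)) (preferred_order : List String) (out : List (String × Int)) : Prop := out = get_ingr_collision_count_alt problematic_pairs preferred_order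
instance (problematic_pairs : List (String × String)) (preferred_order : List String) (out : List (String × Int)) : Decidable (Spec_get_ingr_collision_count problematic_pairs preferred_order out) := by unfold Spec_get_ingr_collision_count; infer_instance

-- ===== CLAIM (what is proved, stated in full; the proofs are below) =====
def Claim_equal_get_ingr_collision_count : Prop := ∀ (problematic_pairs : List (String × String)) (preferred_order : List String), Dom_get_ingr_collision_count problematic_pairs preferred_order → Spec_get_ingr_collision_count problematic_pairs preferred_order (get_ingr_collision_count problematic_pairs preferred_order)

-- ===== LEMMAS AND PROOFS =====

-- ---- A's counting loop equals B's counting loop equals Counter of the flattened pair list ----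
def pvInc (d : PySem.Dict String Int) (k : String) : PySem.Dict String Int :=
  d.insert k (d.getD k 0 + 1)
def pvEns (d : PySem.Dict String Int) (k : String) : PySem.Dict String Int :=
  if d.contains k then d else d.insert k 0

lemma pvEns_contains_self (d : PySem.Dict String Int) (k : String) :
    (pvEns d k).contains k = true := by
  unfold pvEns; split
  · assumption
  · simp

lemma pvEns_of_contains (d : PySem.Dict String Int) (k : String) (h : d.contains k = true) :
    pvEns d k = d := by
  simp [pvEns, h]

lemma pvInc_pvEns (d : PySem.Dict String Int) (k : String) :
    pvInc (pvEns d k) k = pvInc d k := by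
  unfold pvEns pvInc; split
  · rfl
  · rename_i h
    rw [PySem.Dict.getD_insert_self, PySem.Dict.insert_insert_self,
        PySem.Dict.getD_of_not_contains _ _ (by simpa using h)]

lemma pvInc_contains (d : PySem.Dict String Int) (a k : String) (h : d.contains a = true) :
    (pvInc d k).contains a = true := by
  simp [pvInc, PySem.Dict.contains_insert, h]

lemma pvInsert_append_comm (d : PySem.Dict String Int) (a b : String) (v : Int)
    (hne : a ≠ b) (ha : d.contains a = true) (hb : d.contains b = false) :
    (d.insert b 0).insert a v = (d.insert a v).insert b 0 := by
  apply PySem.Dict.ext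
  have hba : (d.insert b 0).contains a = true := by
    simp [PySem.Dict.contains_insert, ha]
  have hab : (d.insert a v).contains b = false := by
    simp [PySem.Dict.contains_insert, hb, hne.symm]
  rw [PySem.Dict.items_insert_of_contains _ _ hba,
      PySem.Dict.items_insert_of_not_contains _ _ hb,
      PySem.Dict.items_insert_of_not_contains _ _ hab,
      PySem.Dict.items_insert_of_contains _ _ ha]
  simp [hne.symm]

lemma pvInc_pvEns_comm (d : PySem.Dict String Int) (a b : String) (hne : a ≠ b)
    (ha : d.contains a = true) :
    pvInc (pvEns d b) a = pvEns (pvInc d a) b := by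
  unfold pvEns
  by_cases hb : d.contains b = true
  · simp [hb, pvInc_contains _ _ _ hb]
  · replace hb : d.contains b = false := by simpa using hb
    have hb' : (pvInc d a).contains b = false := by
      simp [pvInc, PySem.Dict.contains_insert, hb, hne.symm]
    simp only [hb, hb', Bool.false_eq_true, if_false]
    unfold pvInc
    rw [PySem.Dict.getD_insert_of_ne _ _ _ hne]
    exact pvInsert_append_comm d a b _ hne ha hb

lemma pvStep_eq (d : PySem.Dict String Int) (pair : String × String) :
    (let d1 := pvEns d pair.1
     let d2 := pvEns d1 pair.2
     let d3 := pvInc d2 pair.1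
     pvInc d3 pair.2)
    = pvInc (pvInc d pair.1) pair.2 := by
  obtain ⟨a, b⟩ := pair
  simp only
  by_cases hab : a = b
  · subst hab
    rw [pvEns_of_contains _ _ (pvEns_contains_self d a), pvInc_pvEns]
  · rw [pvInc_pvEns_comm (pvEns d a) a b hab (pvEns_contains_self d a), pvInc_pvEns, pvInc_pvEns]

lemma pvFold_eq (problematic_pairs : List (String × String)) :
    problematic_pairs.foldl (fun d pair =>
      let d := if d.contains pair.1 then d else d.insert pair.1 0
      let d := if d.contains pair.2 then d else d.insert pair.2 0
      let d := d.insert pair.1 (d.getD pair.1 0 + 1)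
      d.insert pair.2 (d.getD pair.2 0 + 1)) (PySem.Dict.empty : PySem.Dict String Int)
    = problematic_pairs.foldl (fun d pair =>
      [pair.1, pair.2].foldl (fun d ingr => d.insert ingr (d.getD ingr 0 + 1)) d) PySem.Dict.empty := by
  refine PySem.List.foldl_congr_mem _ _ _ _ ?_
  intro acc x _
  have h := pvStep_eq acc x
  simp only [pvEns, pvInc] at h
  simpa using h

def pvFlat (problematic_pairs : List (String × String)) : List String :=
  problematic_pairs.flatMap (fun p => [p.1, p.2])

lemma pvCounts_eq_counter (problematic_pairs : List (String × String)) :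
    problematic_pairs.foldl (fun d pair =>
      [pair.1, pair.2].foldl (fun d ingr => d.insert ingr (d.getD ingr 0 + 1)) d) PySem.Dict.empty
    = PySem.Dict.counter (pvFlat problematic_pairs) := by
  rw [← PySem.Dict.foldl_insert_getD_add_one_eq_counter, pvFlat, List.foldl_flatMap]

lemma pvFlat_length (problematic_pairs : List (String × String)) :
    (pvFlat problematic_pairs).length = 2 * problematic_pairs.length := by
  induction problematic_pairs with
  | nil => rfl
  | cons p t ih => simp [pvFlat, List.flatMap_cons] at ih ⊢; omega

lemma pvItems_bounds (problematic_pairs : List (String × String)) :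
    ∀ kv ∈ (PySem.Dict.counter (pvFlat problematic_pairs)).items,
      1 ≤ kv.2 ∧ kv.2 ≤ 2 * (problematic_pairs.length : Int) := by
  intro kv hkv
  rw [PySem.Dict.items_counter] at hkv
  obtain ⟨k, hk, rfl⟩ := List.mem_map.mp hkv
  have hkmem : k ∈ pvFlat problematic_pairs := (PySem.Set.mem_ofList _ _).mp hk
  have h1 : 0 < (pvFlat problematic_pairs).count k := List.count_pos_iff.mpr hkmem
  have h2 : (pvFlat problematic_pairs).count k ≤ (pvFlat problematic_pairs).length :=
    List.count_le_length
  rw [pvFlat_length] at h2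
  constructor <;> simp <;> omega

lemma pvItems_nodup (problematic_pairs : List (String × String)) :
    ((PySem.Dict.counter (pvFlat problematic_pairs)).items.map Prod.fst).Nodup := by
  have := PySem.Dict.nodup_keys_counter (pvFlat problematic_pairs)
  simpa [PySem.Dict.keys] using this

lemma pvOfList_items (l : List (String × Int)) (h : (l.map Prod.fst).Nodup) :
    (PySem.Dict.ofList l).items = l := by
  show (List.foldl (fun d (a : String × Int) => d.insert a.1 a.2) PySem.Dict.empty l).items = l
  rw [PySem.Dict.items_foldl_insert_fresh l Prod.fst Prod.snd PySem.Dict.empty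
      (fun a _ => PySem.Dict.contains_empty _) h]
  simp [PySem.Dict.empty]

-- ---- characterisation of A's double sort: one sort of the index-decorated items by the key pvKB ----
def pvMemB (pref : List String) (kv : String × Int) : Bool := pref.contains kv.1
def pvK1 (pref : List String) (p : Int × (String × Int)) : Lex (Bool × Int) :=
  toLex (pvMemB pref p.2, p.1)
def pvKB (pref : List String) (p : Int × (String × Int)) : Lex (Int × Lex (Bool × Int)) :=
  toLex (-p.2.2, toLex (pvMemB pref p.2, p.1))

lemma pvMap_insertBy {D β : Type} (f : D → β) (ltd : D → D → Bool) (lt : β → β → Bool) (x : D) :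
    ∀ (acc : List D), (∀ p ∈ acc, ltd x p = lt (f x) (f p)) →
    (PySem.List.insertBy ltd x acc).map f = PySem.List.insertBy lt (f x) (acc.map f) := by
  intro acc
  induction acc with
  | nil => intro _; simp [PySem.List.insertBy]
  | cons y ys ih =>
      intro h
      have hy := h y (by simp)
      simp only [PySem.List.insertBy, List.map_cons, hy]
      by_cases hb : lt (f x) (f y) = true
      · simp [hb]
      · replace hb : lt (f x) (f y) = false := by simpa using hb
        simp only [hb, Bool.false_eq_true, if_false, List.map_cons]
        rw [ih (fun p hp => h p (by simp [hp]))]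

lemma pvFoldl_insertBy_map {D β : Type} (f : D → β) (ltd : D → D → Bool) (lt : β → β → Bool) :
    ∀ (l acc : List D),
      (∀ p ∈ acc, ∀ q ∈ l, ltd q p = lt (f q) (f p)) →
      List.Pairwise (fun p q => ltd q p = lt (f q) (f p)) l →
      (l.foldl (fun a x => PySem.List.insertBy ltd x a) acc).map f
        = (l.map f).foldl (fun a y => PySem.List.insertBy lt y a) (acc.map f) := by
  intro l
  induction l with
  | nil => intro acc _ _; simp
  | cons x t ih =>
      intro acc h hpw
      simp only [List.foldl_cons, List.map_cons]
      rw [← pvMap_insertBy f ltd lt x acc (fun p hp => h p hp x (by simp))]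
      apply ih
      · intro p hp q hq
        rcases (PySem.List.mem_insertBy ltd x p acc).mp hp with rfl | hp'
        · exact (List.pairwise_cons.mp hpw).1 q hq
        · exact h p hp' q (by simp [hq])
      · exact (List.pairwise_cons.mp hpw).2

lemma pvK1_cond (pref : List String) (p q : Int × (String × Int)) (h : p.1 < q.1) :
    decide (pvK1 pref q < pvK1 pref p) = decide (pvMemB pref q.2 < pvMemB pref p.2) := by
  have h' : ¬ (q.1 < p.1) := not_lt.mpr h.le
  cases hq : pvMemB pref q.2 <;> cases hp : pvMemB pref p.2 <;>
    simp [pvK1, Prod.Lex.lt_iff, hq, hp, Bool.lt_iff, h']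

lemma pvKB_cond_K1 (pref : List String) (p q : Int × (String × Int)) (h : pvK1 pref p < pvK1 pref q) :
    decide (pvKB pref q < pvKB pref p) = decide (p.2.2 < q.2.2) := by
  simp only [pvK1, Prod.Lex.lt_iff, ofLex_toLex] at h
  have h' : ¬ (pvMemB pref q.2 < pvMemB pref p.2 ∨ pvMemB pref q.2 = pvMemB pref p.2 ∧ q.1 < p.1) := by
    rcases h with h1 | ⟨h1, h2⟩
    · rintro (h3 | ⟨h3, h4⟩)
      · exact absurd h1 (not_lt.mpr h3.le)
      · exact absurd h1 (by simp [h3])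
    · rintro (h3 | ⟨h3, h4⟩)
      · exact absurd h3 (by simp [h1])
      · omega
  simp only [pvKB, Prod.Lex.lt_iff, ofLex_toLex, decide_eq_decide]
  constructor
  · rintro (h1 | ⟨h1, h2⟩)
    · omega
    · exact absurd h2 h'
  · intro h1; left; omega

lemma pvPairwise_strict {κ : Type} [LinearOrder κ] (K : Int × (String × Int) → κ)
    (hinj : ∀ p q, K p = K q → p.1 = q.1) (items : List (String × Int))
    (l : List (Int × (String × Int)))
    (hperm : l.Perm (PySem.List.enumerate items 0))
    (hpw : List.Pairwise (fun a b => K a ≤ K b) l) :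
    List.Pairwise (fun a b => K a < K b) l := by
  have h0 : (PySem.List.enumerate items 0).Pairwise (fun p q => p.1 ≠ q.1) :=
    (PySem.List.pairwise_lt_enumerate items 0).imp (fun h => ne_of_lt h)
  have hne : l.Pairwise (fun a b => a.1 ≠ b.1) :=
    (List.Perm.pairwise_iff (fun h => h.symm) hperm).mpr h0
  exact (hpw.and hne).imp (fun ⟨hle, hne'⟩ => lt_of_le_of_ne hle (fun e => hne' (hinj _ _ e)))

lemma pvK1_inj (pref : List String) (p q : Int × (String × Int))
    (h : pvK1 pref p = pvK1 pref q) : p.1 = q.1 := by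
  have h2 := congrArg (fun x => (ofLex x).2) h
  simpa [pvK1] using h2

lemma pvKB_inj (pref : List String) (p q : Int × (String × Int))
    (h : pvKB pref p = pvKB pref q) : p.1 = q.1 := by
  have h2 := congrArg (fun x => (ofLex (ofLex x).2).2) h
  simpa [pvKB] using h2

lemma pvA_char (pref : List String) (items : List (String × Int)) :
    PySem.List.sorted (PySem.List.sorted items (fun kv => pref.contains kv.1) false) (fun kv => kv.2) true
      = (PySem.List.sorted (PySem.List.enumerate items 0) (pvKB pref) false).map (fun x => x.2) := by
  set exs := PySem.List.enumerate items 0 with hexs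
  set D1 := PySem.List.sorted exs (pvK1 pref) false with hD1
  have hA1 : D1.map (fun x => x.2) = PySem.List.sorted items (fun kv => pref.contains kv.1) false := by
    rw [hD1, PySem.List.sorted_eq_foldl_insertBy exs (pvK1 pref),
        PySem.List.sorted_eq_foldl_insertBy items (fun kv => pref.contains kv.1)]
    rw [pvFoldl_insertBy_map (fun x => x.2)
        (fun a b => decide (pvK1 pref a < pvK1 pref b))
        (fun a b => decide (pvMemB pref a < pvMemB pref b)) exs []
        (by intro p hp; simp at hp)
        ((PySem.List.pairwise_lt_enumerate items 0).imp (fun h => pvK1_cond pref _ _ h))]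
    rw [PySem.List.map_snd_enumerate]
    rfl
  have hpairK1 : D1.Pairwise (fun a b => pvK1 pref a < pvK1 pref b) :=
    pvPairwise_strict (pvK1 pref) (pvK1_inj pref) items D1
      (PySem.List.sorted_perm exs (pvK1 pref) false)
      (PySem.List.sorted_pairwise exs (pvK1 pref))
  have hA2 : (PySem.List.sorted D1 (pvKB pref) false).map (fun x => x.2)
      = PySem.List.sorted (D1.map (fun x => x.2)) (fun kv => kv.2) true := by
    rw [PySem.List.sorted_eq_foldl_insertBy D1 (pvKB pref),
        PySem.List.sorted_rev_eq_foldl_insertBy (D1.map (fun x => x.2)) (fun kv => kv.2)]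
    rw [pvFoldl_insertBy_map (fun x => x.2)
        (fun a b => decide (pvKB pref a < pvKB pref b))
        (fun a b => decide (b.2 < a.2)) D1 []
        (by intro p hp; simp at hp)
        (hpairK1.imp (fun h => pvKB_cond_K1 pref _ _ h))]
    rfl
  have hU : PySem.List.sorted D1 (pvKB pref) false = PySem.List.sorted exs (pvKB pref) false := by
    refine (PySem.List.sorted_eq_of_perm_of_pairwise_lt exs (PySem.List.sorted D1 (pvKB pref) false) (pvKB pref) ?_ ?_).symm
    · exact (PySem.List.sorted_perm D1 (pvKB pref) false).trans (PySem.List.sorted_perm exs (pvK1 pref) false)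
    · exact pvPairwise_strict (pvKB pref) (pvKB_inj pref) items _
        ((PySem.List.sorted_perm D1 (pvKB pref) false).trans (PySem.List.sorted_perm exs (pvK1 pref) false))
        (PySem.List.sorted_pairwise D1 (pvKB pref))
  rw [← hA1, ← hA2, hU]

-- ---- blocks: one bucket's contents, as two filters of the items list ----
def pvBlock {α : Type} (f : α → Int) (g : α → Bool) (l : List α) (c : Int) : List α :=
  l.filter (fun x => f x == c && !g x) ++ l.filter (fun x => f x == c && g x)

lemma pvBlock_perm {α : Type} (f : α → Int) (g : α → Bool) (l : List α) (c : Int) :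
    (pvBlock f g l c).Perm (l.filter (fun x => f x == c)) := by
  unfold pvBlock
  have h1 : l.filter (fun x => f x == c && !g x)
      = (l.filter (fun x => f x == c)).filter (fun x => !g x) := by
    rw [List.filter_filter]
    exact (List.filter_congr (fun x _ => by rw [Bool.and_comm])).symm
  have h2 : l.filter (fun x => f x == c && g x)
      = (l.filter (fun x => f x == c)).filter g := by
    rw [List.filter_filter]
    exact (List.filter_congr (fun x _ => by rw [Bool.and_comm])).symm
  rw [h1, h2]
  have := List.filter_append_perm (fun x => !g x) (l.filter (fun x => f x == c))
  simpa using this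

lemma pvPartition_perm {α : Type} (f : α → Int) :
    ∀ (cs : List Int) (l : List α), cs.Nodup → (∀ x ∈ l, f x ∈ cs) →
    (cs.flatMap (fun c => l.filter (fun x => f x == c))).Perm l := by
  intro cs
  induction cs with
  | nil =>
      intro l _ h
      have hl : l = [] := by
        cases l with
        | nil => rfl
        | cons a t => exact absurd (h a (by simp)) (by simp)
      simp [hl]
  | cons c cs ih =>
      intro l hnd hmem
      rw [List.flatMap_cons]
      have hrw : cs.flatMap (fun c' => l.filter (fun x => f x == c'))
          = cs.flatMap (fun c' => (l.filter (fun x => !(f x == c))).filter (fun x => f x == c')) := by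
        apply List.flatMap_congr
        intro c' hc'
        have hne : c' ≠ c := by
          rintro rfl; exact (List.nodup_cons.mp hnd).1 hc'
        rw [List.filter_filter]
        apply List.filter_congr
        intro x _
        by_cases hx : f x = c'
        · simp [hx, hne]
        · simp [hx]
      rw [hrw]
      have hsub : ∀ x ∈ l.filter (fun x => !(f x == c)), f x ∈ cs := by
        intro x hx
        obtain ⟨hxl, hxp⟩ := List.mem_filter.mp hx
        have := hmem x hxl
        simp at hxp
        simpa [hxp] using this
      exact (List.Perm.append_left _ (ih _ (List.nodup_cons.mp hnd).2 hsub)).trans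
        (List.filter_append_perm _ l)

lemma pvBlocks_perm {α : Type} (f : α → Int) (g : α → Bool) (l : List α) (cs : List Int)
    (hnd : cs.Nodup) (hmem : ∀ x ∈ l, f x ∈ cs) :
    (cs.flatMap (pvBlock f g l)).Perm l :=
  (List.Perm.flatMap_left cs (fun c _ => pvBlock_perm f g l c)).trans
    (pvPartition_perm f cs l hnd hmem)

-- ---- pairwise order of the flattened blocks under the composite key pvKB ----
lemma pvPairwise_flatMap {α β : Type} (R : β → β → Prop) (cs : List α) (f : α → List β)
    (h1 : ∀ c ∈ cs, (f c).Pairwise R)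
    (h2 : cs.Pairwise (fun c c' => ∀ x ∈ f c, ∀ y ∈ f c', R x y)) :
    (cs.flatMap f).Pairwise R := by
  induction cs with
  | nil => simp
  | cons c t ih =>
      rw [List.flatMap_cons, List.pairwise_append]
      refine ⟨h1 c (by simp), ih (fun c' hc' => h1 c' (by simp [hc'])) (List.pairwise_cons.mp h2).2, ?_⟩
      intro x hx y hy
      obtain ⟨c', hc', hy'⟩ := List.mem_flatMap.mp hy
      exact (List.pairwise_cons.mp h2).1 c' hc' x hx y hy'

lemma pvKB_lt_of_count (pref : List String) (p q : Int × (String × Int)) (h : q.2.2 < p.2.2) :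
    pvKB pref p < pvKB pref q := by
  simp only [pvKB, Prod.Lex.lt_iff, ofLex_toLex]
  left; omega

lemma pvKB_lt_of_flag (pref : List String) (p q : Int × (String × Int)) (hc : p.2.2 = q.2.2)
    (hp : pvMemB pref p.2 = false) (hq : pvMemB pref q.2 = true) :
    pvKB pref p < pvKB pref q := by
  simp [pvKB, Prod.Lex.lt_iff, hc, hp, hq, Bool.lt_iff]

lemma pvKB_lt_of_idx (pref : List String) (p q : Int × (String × Int)) (hc : p.2.2 = q.2.2)
    (hg : pvMemB pref p.2 = pvMemB pref q.2) (hi : p.1 < q.1) :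
    pvKB pref p < pvKB pref q := by
  simp [pvKB, Prod.Lex.lt_iff, hc, hg, hi]

lemma pvRange_nodup (a : Int) : (PySem.List.pyRange a 0 (-1)).Nodup := by
  rw [PySem.List.pyRange_neg_one_eq_reverse]
  exact List.nodup_reverse.mpr (PySem.List.nodup_pyRange_one _ _)

lemma pvRange_desc (a : Int) : (PySem.List.pyRange a 0 (-1)).Pairwise (fun x y => y < x) := by
  rw [PySem.List.pyRange_neg_one_eq_reverse]
  exact List.pairwise_reverse.mpr (PySem.List.pairwise_lt_pyRange_one _ _)

lemma pvBlock_mem_class {α : Type} (f : α → Int) (g : α → Bool) (l : List α) (c : Int) (x : α)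
    (hx : x ∈ pvBlock f g l c) : f x = c := by
  unfold pvBlock at hx
  rcases List.mem_append.mp hx with h | h <;>
  · have := (List.mem_filter.mp h).2
    simp only [Bool.and_eq_true, beq_iff_eq] at this
    exact this.1

lemma pvSorted_blocks (pref : List String) (items : List (String × Int)) (n : Int)
    (hb : ∀ kv ∈ items, 1 ≤ kv.2 ∧ kv.2 ≤ n) :
    PySem.List.sorted (PySem.List.enumerate items 0) (pvKB pref) false
      = (PySem.List.pyRange n 0 (-1)).flatMap
          (pvBlock (fun p : Int × (String × Int) => p.2.2) (fun p => pref.contains p.2.1)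
            (PySem.List.enumerate items 0)) := by
  set exs := PySem.List.enumerate items 0 with hexs
  have hbe : ∀ p ∈ exs, (1 : Int) ≤ p.2.2 ∧ p.2.2 ≤ n := by
    intro p hp
    obtain ⟨k, hk, rfl⟩ := (PySem.List.mem_enumerate_iff _ _ _).mp hp
    exact hb _ (by simp)
  refine PySem.List.sorted_eq_of_perm_of_pairwise_lt exs _ (pvKB pref) ?_ ?_
  · refine pvBlocks_perm _ _ exs _ (pvRange_nodup n) ?_
    intro p hp
    rw [PySem.List.mem_pyRange_neg_one]
    have := hbe p hp
    omega
  · refine pvPairwise_flatMap _ _ _ ?_ ?_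
    · intro c _
      unfold pvBlock
      rw [List.pairwise_append]
      have hpw := PySem.List.pairwise_lt_enumerate items 0
      refine ⟨?_, ?_, ?_⟩
      · refine (List.Pairwise.filter _ hpw).imp_of_mem ?_
        intro p q hp hq hlt
        obtain ⟨-, hp'⟩ := List.mem_filter.mp hp
        obtain ⟨-, hq'⟩ := List.mem_filter.mp hq
        simp only [Bool.and_eq_true, beq_iff_eq, Bool.not_eq_eq_eq_not, Bool.not_true] at hp' hq'
        exact pvKB_lt_of_idx pref p q (by rw [hp'.1, hq'.1]) (by
          show pref.contains p.2.1 = pref.contains q.2.1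
          rw [hp'.2, hq'.2]) hlt
      · refine (List.Pairwise.filter _ hpw).imp_of_mem ?_
        intro p q hp hq hlt
        obtain ⟨-, hp'⟩ := List.mem_filter.mp hp
        obtain ⟨-, hq'⟩ := List.mem_filter.mp hq
        simp only [Bool.and_eq_true, beq_iff_eq] at hp' hq'
        exact pvKB_lt_of_idx pref p q (by rw [hp'.1, hq'.1]) (by
          show pref.contains p.2.1 = pref.contains q.2.1
          rw [hp'.2, hq'.2]) hlt
      · intro p hp q hq
        obtain ⟨-, hp'⟩ := List.mem_filter.mp hp
        obtain ⟨-, hq'⟩ := List.mem_filter.mp hq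
        simp only [Bool.and_eq_true, beq_iff_eq, Bool.not_eq_eq_eq_not, Bool.not_true] at hp' hq'
        exact pvKB_lt_of_flag pref p q (by rw [hp'.1, hq'.1]) hp'.2 hq'.2
    · refine (pvRange_desc n).imp_of_mem ?_
      intro c c' _ _ hlt p hp q hq
      have hp' := pvBlock_mem_class _ _ _ _ _ hp
      have hq' := pvBlock_mem_class _ _ _ _ _ hq
      exact pvKB_lt_of_count pref p q (by omega)

-- ---- projecting the decorated blocks back to the items ----
lemma pvFilter_enum {α : Type} (q : α → Bool) (l : List α) :
    ∀ s, ((PySem.List.enumerate l s).filter (fun p => q p.2)).map (fun p => p.2) = l.filter q := by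
  induction l with
  | nil => intro s; simp [PySem.List.enumerate_nil]
  | cons x t ih =>
      intro s
      rw [PySem.List.enumerate_cons]
      by_cases hx : q x = true
      · simp [hx, ih]
      · simp [hx, ih]

lemma pvBlock_map_snd (pref : List String) (items : List (String × Int)) (c : Int) :
    (pvBlock (fun p : Int × (String × Int) => p.2.2) (fun p => pref.contains p.2.1)
        (PySem.List.enumerate items 0) c).map (fun p => p.2)
      = pvBlock (fun kv : String × Int => kv.2) (fun kv => pref.contains kv.1) items c := by
  unfold pvBlock
  rw [List.map_append, pvFilter_enum (fun kv : String × Int => kv.2 == c && !pref.contains kv.1),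
      pvFilter_enum (fun kv : String × Int => kv.2 == c && pref.contains kv.1)]

-- ---- B's bucket build and emission loops produce exactly the flattened blocks ----
lemma pvPairFold (pref : List String) (l : List (String × Int)) :
    ∀ (b1 b2 : PySem.Dict Int (List String)),
    l.foldl (fun (bs : PySem.Dict Int (List String) × PySem.Dict Int (List String)) kv =>
        if pref.contains kv.1
        then (bs.1, bs.2.insert kv.2 (bs.2.getD kv.2 [] ++ [kv.1]))
        else (bs.1.insert kv.2 (bs.1.getD kv.2 [] ++ [kv.1]), bs.2)) (b1, b2)
    = ((l.filter (fun kv => !pref.contains kv.1)).foldl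
          (fun d kv => d.insert kv.2 (d.getD kv.2 [] ++ [kv.1])) b1,
       (l.filter (fun kv => pref.contains kv.1)).foldl
          (fun d kv => d.insert kv.2 (d.getD kv.2 [] ++ [kv.1])) b2) := by
  induction l with
  | nil => intro b1 b2; simp
  | cons kv t ih =>
      intro b1 b2
      rw [List.foldl_cons, List.filter_cons, List.filter_cons]
      by_cases h : pref.contains kv.1 = true
      · simp only [h, Bool.not_true, Bool.false_eq_true, if_false]
        exact ih b1 _
      · replace h : pref.contains kv.1 = false := by simpa using h
        simp only [h, Bool.false_eq_true, if_false, Bool.not_false]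
        exact ih _ b2

lemma pvBucket_getD (l : List (String × Int)) (c : Int) :
    (l.foldl (fun d kv => d.insert kv.2 (d.getD kv.2 [] ++ [kv.1])) PySem.Dict.empty).getD c []
    = (l.filter (fun kv => kv.2 == c)).map (fun kv => kv.1) := by
  have h1 : l.foldl (fun d kv => d.insert kv.2 (d.getD kv.2 [] ++ [kv.1])) PySem.Dict.empty
      = (l.map (fun kv => (kv.2, kv.1))).foldl
          (fun d p => d.modify p.1 [] (· ++ [p.2])) PySem.Dict.empty := by
    rw [List.foldl_map]
    rfl
  rw [h1, PySem.Dict.getD_foldl_modify_append]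
  rw [List.filter_map, List.map_map]
  simp [PySem.Dict.getD_empty, Function.comp_def]

lemma pvEmit (pref : List String) (items : List (String × Int)) (cs : List Int)
    (hndcs : cs.Nodup) (hnd : (items.map Prod.fst).Nodup)
    (hmem : ∀ kv ∈ items, kv.2 ∈ cs) :
    (cs.foldl (fun r c =>
        (((items.filter (fun kv => pref.contains kv.1)).foldl
            (fun d kv => d.insert kv.2 (d.getD kv.2 [] ++ [kv.1])) PySem.Dict.empty).getD c []).foldl
          (fun r k => r.insert k c)
          ((((items.filter (fun kv => !pref.contains kv.1)).foldl
              (fun d kv => d.insert kv.2 (d.getD kv.2 [] ++ [kv.1])) PySem.Dict.empty).getD c []).foldl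
            (fun r k => r.insert k c) r))
      PySem.Dict.empty).items
    = cs.flatMap (pvBlock (fun kv : String × Int => kv.2) (fun kv => pref.contains kv.1) items) := by
  have hstep : ∀ (r : PySem.Dict String Int), ∀ c ∈ cs,
      (((items.filter (fun kv => pref.contains kv.1)).foldl
          (fun d kv => d.insert kv.2 (d.getD kv.2 [] ++ [kv.1])) PySem.Dict.empty).getD c []).foldl
        (fun r k => r.insert k c)
        ((((items.filter (fun kv => !pref.contains kv.1)).foldl
            (fun d kv => d.insert kv.2 (d.getD kv.2 [] ++ [kv.1])) PySem.Dict.empty).getD c []).foldl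
          (fun r k => r.insert k c) r)
      = (pvBlock (fun kv : String × Int => kv.2) (fun kv => pref.contains kv.1) items c).foldl
          (fun r kv => r.insert kv.1 kv.2) r := by
    intro r c _
    have hmerge : ∀ pr : (String × Int) → Bool,
        (items.filter pr).filter (fun kv : String × Int => kv.2 == c)
          = items.filter (fun kv => kv.2 == c && pr kv) := by
      intro pr
      rw [List.filter_filter]
    have hcongr : ∀ (pr : (String × Int) → Bool) (r : PySem.Dict String Int),
        (items.filter (fun kv => kv.2 == c && pr kv)).foldl (fun r kv => r.insert kv.1 c) r
        = (items.filter (fun kv => kv.2 == c && pr kv)).foldl (fun r kv => r.insert kv.1 kv.2) r := by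
      intro pr r
      refine PySem.List.foldl_congr_mem _ _ _ _ ?_
      intro acc kv hkv
      have := (List.mem_filter.mp hkv).2
      simp only [Bool.and_eq_true, beq_iff_eq] at this
      rw [this.1]
    rw [pvBucket_getD, pvBucket_getD,
        hmerge (fun kv => pref.contains kv.1), hmerge (fun kv => !pref.contains kv.1)]
    simp only [List.foldl_map]
    rw [hcongr, hcongr]
    unfold pvBlock
    rw [List.foldl_append]
  rw [PySem.List.foldl_congr_mem cs _
      (fun r c => (pvBlock (fun kv : String × Int => kv.2) (fun kv => pref.contains kv.1) items c).foldl
          (fun r kv => r.insert kv.1 kv.2) r) PySem.Dict.empty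
      (fun r c hc => hstep r c hc)]
  rw [← List.foldl_flatMap]
  have hperm : (cs.flatMap (pvBlock (fun kv : String × Int => kv.2)
      (fun kv => pref.contains kv.1) items)).Perm items :=
    pvBlocks_perm _ _ items cs hndcs hmem
  have hnodup : ((cs.flatMap (pvBlock (fun kv : String × Int => kv.2)
      (fun kv => pref.contains kv.1) items)).map Prod.fst).Nodup :=
    ((hperm.map Prod.fst).nodup_iff).mpr hnd
  rw [PySem.Dict.items_foldl_insert_fresh _ Prod.fst Prod.snd PySem.Dict.empty
      (fun a _ => PySem.Dict.contains_empty _) hnodup]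
  simp [PySem.Dict.empty]

lemma pvB_char (pairs : List (String × String)) (pref : List String) :
    get_ingr_collision_count_alt pairs pref
      = (PySem.List.pyRange (2 * (pairs.length : Int)) 0 (-1)).flatMap
          (pvBlock (fun kv : String × Int => kv.2) (fun kv => pref.contains kv.1)
            (PySem.Dict.counter (pvFlat pairs)).items) := by
  show (((PySem.List.pyRange (2 * (pairs.length : Int)) 0 (-1)).foldl (fun r c => (((pairs.foldl (fun d pair => [pair.1, pair.2].foldl (fun d ingr => d.insert ingr (d.getD ingr 0 + 1)) d) PySem.Dict.empty).items.foldl (fun (bs : PySem.Dict Int (List String) × PySem.Dict Int (List String)) kv => if pref.contains kv.1 then (bs.1, bs.2.insert kv.2 (bs.2.getD kv.2 [] ++ [kv.1])) else (bs.1.insert kv.2 (bs.1.getD kv.2 [] ++ [kv.1]), bs.2)) (PySem.Dict.empty, PySem.Dict.empty)).2.getD c []).foldl (fun r k => r.insert k c) ((((pairs.foldl (fun d pair => [pair.1, pair.2].foldl (fun d ingr => d.insert ingr (d.getD ingr 0 + 1)) d) PySem.Dict.empty).items.foldl (fun (bs : PySem.Dict Int (List String) × PySem.Dict Int (List String)) kv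 => if pref.contains kv.1 then (bs.1, bs.2.insert kv.2 (bs.2.getD kv.2 [] ++ [kv.1])) else (bs.1.insert kv.2 (bs.1.getD kv.2 [] ++ [kv.1]), bs.2)) (PySem.Dict.empty, PySem.Dict.empty)).1.getD c []).foldl (fun r k => r.insert k c) r)) PySem.Dict.empty).items)
      = (PySem.List.pyRange (2 * (pairs.length : Int)) 0 (-1)).flatMap
          (pvBlock (fun kv : String × Int => kv.2) (fun kv => pref.contains kv.1)
            (PySem.Dict.counter (pvFlat pairs)).items)
  rw [pvCounts_eq_counter, pvPairFold]
  exact pvEmit pref _ _ (pvRange_nodup _) (pvItems_nodup pairs)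
    (fun kv hkv => by
      rw [PySem.List.mem_pyRange_neg_one]
      have := pvItems_bounds pairs kv hkv
      omega)

-- ===== VERDICT (by name: the statement is the Claim_ definition above) =====
theorem get_ingr_collision_count_spec : Claim_equal_get_ingr_collision_count := by
  intro pairs pref _
  show (PySem.Dict.ofList (PySem.List.sorted
          (PySem.Dict.ofList (PySem.List.sorted
              (pairs.foldl (fun d pair => let d := if d.contains pair.1 then d else d.insert pair.1 0; let d := if d.contains pair.2 then d else d.insert pair.2 0; let d := d.insert pair.1 (d.getD pair.1 0 + 1); d.insert pair.2 (d.getD pair.2 0 + 1)) PySem.Dict.empty).items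
              (fun item => pref.contains item.1) false)).items
          (fun item => item.2) true)).items
      = get_ingr_collision_count_alt pairs pref
  rw [pvFold_eq, pvCounts_eq_counter]
  set items := (PySem.Dict.counter (pvFlat pairs)).items with hitems
  have hnd : (items.map Prod.fst).Nodup := pvItems_nodup pairs
  have hnd1 : ((PySem.List.sorted items (fun item => pref.contains item.1) false).map Prod.fst).Nodup :=
    (((PySem.List.sorted_perm items (fun item => pref.contains item.1) false).map Prod.fst).nodup_iff).mpr hnd
  rw [pvOfList_items _ hnd1]
  have hnd2 : ((PySem.List.sorted (PySem.List.sorted items (fun item => pref.contains item.1) false) (fun item => item.2) true).map Prod.fst).Nodup :=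
    (((PySem.List.sorted_perm _ (fun item : String × Int => item.2) true).map Prod.fst).nodup_iff).mpr hnd1
  rw [pvOfList_items _ hnd2]
  rw [pvA_char pref items,
      pvSorted_blocks pref items (2 * (pairs.length : Int)) (fun kv hkv => pvItems_bounds pairs kv hkv)]
  rw [List.map_flatMap]
  rw [pvB_char pairs pref]
  exact List.flatMap_congr (fun c _ => pvBlock_map_snd pref items c)
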